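-- pv_equiv track=rewrite | github.com/gfads/mps-methodology | training_of_models.py | d_values
-- ===== SOURCE A (Python) =====
-- def d_values(data: list):
--     a = 0
--     for index in range(len(data) - 1, 0, -1):
--         if (data[index] - data[index - 1]) != 1:
--             return len(data) - 1 - index
--         else:
--             a = len(data) - 1
--
--     return a
-- ===== SOURCE B (Python) =====
-- def d_values(data: list):
--     run = 0
--     for prev, cur in zip(data, data[1:]):
--         run = run + 1 if cur - prev == 1 else 0
--     return run
-- ===== Notes on version B (the rewrite author's own statement) =====
-- stated objective: simpler
-- what changed: Replaces the backward indexed scan with early return and len-1-index arithmetic by a single forward fold over adjacent pairs (zip) with a reset counter; no indexing and no early exit.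
import Mathlib
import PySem

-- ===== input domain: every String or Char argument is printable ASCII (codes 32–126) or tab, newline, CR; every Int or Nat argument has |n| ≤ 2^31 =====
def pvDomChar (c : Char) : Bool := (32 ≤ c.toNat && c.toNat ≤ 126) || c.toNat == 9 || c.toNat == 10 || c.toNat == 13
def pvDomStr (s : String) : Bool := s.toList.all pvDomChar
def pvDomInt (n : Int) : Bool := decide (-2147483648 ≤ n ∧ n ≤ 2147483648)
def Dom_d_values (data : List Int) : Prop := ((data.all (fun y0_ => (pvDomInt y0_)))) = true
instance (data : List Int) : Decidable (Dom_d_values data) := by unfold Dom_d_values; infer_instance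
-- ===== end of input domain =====

-- B replaces A's backward indexed scan with early return by a single forward fold over adjacent pairs with a reset counter (objective: simpler).


-- ===== PORT A =====
-- the loop 'for index in range(len(data)-1, 0, -1)' with its early return;
-- the indices hit are always in range (1 ≤ index < len), so pyGetD's default 0 is never used
def dLoopA (data : List Int) : List Int → Int → Int
  | [], a => a
  | i :: rest, _a =>
    if PySem.List.pyGetD data i 0 - PySem.List.pyGetD data (i - 1) 0 ≠ 1 then
      (data.length : Int) - 1 - i
    else
      dLoopA data rest ((data.length : Int) - 1)

def d_values (data : List Int) : Int :=
  dLoopA data (PySem.List.pyRange ((data.length : Int) - 1) 0 (-1)) 0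

-- ===== PORT B =====
def d_values_alt (data : List Int) : Int :=
  (data.zip (PySem.List.slice data (some 1) none)).foldl
    (fun run pc => if pc.2 - pc.1 = 1 then run + 1 else 0) 0

-- ===== PRECONDITION & SPEC =====
def Spec_d_values (data : List Int) (out : Int) : Prop := out = d_values_alt data
instance (data : List Int) (out : Int) : Decidable (Spec_d_values data out) := by unfold Spec_d_values; infer_instance

-- ===== CLAIM (what is proved, stated in full; the proofs are below) =====
def Claim_equal_d_values : Prop := ∀ (data : List Int), Dom_d_values data → Spec_d_values data (d_values data)

-- ===== LEMMAS AND PROOFS =====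

-- the list of adjacent differences data[j+1] - data[j]
def pvEdges (data : List Int) : List Int :=
  (data.zip data.tail).map (fun p => p.2 - p.1)

theorem pvEdges_length (data : List Int) :
    (pvEdges data).length = data.length - 1 := by
  simp [pvEdges, List.length_zip, List.length_tail]

theorem pvEdges_getElem (data : List Int) (j : Nat) (h : j + 1 < data.length)
    (h' : j < (pvEdges data).length) :
    (pvEdges data)[j] = data[j + 1] - data[j] := by
  simp [pvEdges, List.getElem_zip, List.getElem_tail]

-- B equals the reset-counter fold over the edge list
theorem alt_eq_fold (data : List Int) :
    d_values_alt data =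
      (pvEdges data).foldl (fun run e => if e = 1 then run + 1 else 0) 0 := by
  simp [d_values_alt, pvEdges, PySem.List.slice_from_one, List.foldl_map]

-- the reset-counter fold counts the leading 1s of the reversed edge list
theorem fold_eq_trail (es : List Int) :
    es.foldl (fun run e => if e = 1 then run + 1 else 0) 0 =
      ((es.reverse.takeWhile (fun e => e == 1)).length : Int) := by
  induction es using List.reverseRecOn with
  | nil => simp
  | append_singleton es e ih =>
    rw [List.foldl_append]
    by_cases he : e = 1 <;> simp [he, ih]

-- A's loop from index m downward, for 1 ≤ m ≤ len-1, with any accumulator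
theorem loopA_eq (data : List Int) (m : Nat) (hm : 1 ≤ m)
    (hle : m ≤ data.length - 1) (a : Int) :
    dLoopA data (PySem.List.pyRange (m : Int) 0 (-1)) a =
      ((data.length : Int) - 1 - m) +
        ((((pvEdges data).take m).reverse.takeWhile (fun e => e == 1)).length : Int) := by
  induction m generalizing a with
  | zero => omega
  | succ m ih =>
    have hn : m + 2 ≤ data.length := by omega
    have hlt : m < (pvEdges data).length := by rw [pvEdges_length]; omega
    rw [show ((m + 1 : Nat) : Int) = (m : Int) + 1 by push_cast; ring,
      PySem.List.pyRange_neg_one_cons (by positivity)]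
    show (if _ then _ else _) = _
    have hidx : PySem.List.pyGetD data ((m : Int) + 1) 0 - PySem.List.pyGetD data ((m : Int) + 1 - 1) 0
        = (pvEdges data)[m] := by
      rw [show ((m : Int) + 1 - 1) = ((m : Nat) : Int) by ring,
        show ((m : Int) + 1) = ((m + 1 : Nat) : Int) by push_cast; ring,
        PySem.List.pyGetD_natCast, PySem.List.pyGetD_natCast,
        pvEdges_getElem data m (by omega) hlt,
        List.getD_eq_getElem data 0 (by omega), List.getD_eq_getElem data 0 (by omega)]
    have htake : ((pvEdges data).take (m + 1)).reverse
        = (pvEdges data)[m] :: ((pvEdges data).take m).reverse := by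
      rw [List.take_add_one, List.getElem?_eq_getElem hlt]
      simp
    by_cases he : (pvEdges data)[m] = 1
    · rw [if_neg (by rw [hidx, he]; simp)]
      rcases Nat.eq_zero_or_pos m with hm0 | hm0
      · subst hm0
        rw [PySem.List.pyRange_neg_one_eq_nil (by norm_num)]
        show ((data.length : Int) - 1) = _
        rw [htake]
        simp [he]
      · rw [show ((m : Int) + 1 - 1) = (m : Int) by ring, ih hm0 (by omega), htake]
        simp [he]
        ring
    · rw [if_pos (by rw [hidx]; exact he)]
      rw [htake]
      simp [he]

-- ===== VERDICT (by name: the statement is the Claim_ definition above) =====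
theorem d_values_spec : Claim_equal_d_values := by
  intro data _
  show d_values data = d_values_alt data
  rw [alt_eq_fold, fold_eq_trail]
  rcases Nat.lt_or_ge data.length 2 with hsmall | hbig
  · -- length 0 or 1: both loops are empty and both sides are 0
    have : (pvEdges data) = [] := by
      have := pvEdges_length data
      cases h : pvEdges data with
      | nil => rfl
      | cons x xs => rw [h] at this; simp at this; omega
    rw [this]
    unfold d_values
    rw [PySem.List.pyRange_neg_one_eq_nil (by omega)]
    rfl
  · have h1 : 1 ≤ data.length - 1 := by omega
    have : ((data.length : Int) - 1) = ((data.length - 1 : Nat) : Int) := by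
      push_cast [Nat.cast_sub (by omega : 1 ≤ data.length)]; ring
    unfold d_values
    rw [this, loopA_eq data (data.length - 1) h1 (le_refl _) 0,
      List.take_of_length_le (by rw [pvEdges_length])]
    push_cast [Nat.cast_sub (by omega : 1 ≤ data.length)]
    ring
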